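-- pv_equiv track=rewrite | github.com/ferraroroberto/pdf-to-markdown | src/chunker.py | _truncate_prev_drop_matching_suffix
-- ===== SOURCE A (Python) =====
-- def _truncate_prev_drop_matching_suffix(prev: str, k: int) -> str:
--     """Remove the last *k* non-empty lines (and everything after the first of them)."""
--     if k <= 0:
--         return prev
--     lines = prev.splitlines(keepends=True)
--     nonempty_idx = [i for i, ln in enumerate(lines) if ln.strip()]
--     if len(nonempty_idx) < k:
--         return prev
--     first_drop = nonempty_idx[-k]
--     return "".join(lines[:first_drop]).rstrip()
-- ===== SOURCE B (Python) =====
-- def _truncate_prev_drop_matching_suffix(prev: str, k: int) -> str: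
--     """Remove the last *k* non-empty lines (and everything after the first of them)."""
--     if k <= 0:
--         return prev
--     count = 0
--     has = False          # current line (scanned so far) has a non-whitespace char
--     tail = 0             # number of characters already scanned from the end
--     cut = None
--     for c in reversed(prev):
--         if c == '\n' or c == '\r':
--             # line boundary: the line just scanned (after this char) is finished
--             if has:
--                 count += 1
--                 if count == k:
--                     cut = len(prev) - tail   # start of that k-th non-empty line
--                     break
--                 has = False
--         elif not c.isspace():
--             has = True
--         tail += 1
--     if cut is None:
--         if has:
--             count += 1       # the first line of the string
--         if count < k:
--             return prev
--         cut = 0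
--     return prev[:cut].rstrip()
-- ===== Notes on version B (the rewrite author's own statement) =====
-- stated objective: alternative
-- what changed: Instead of splitting the whole string into keepends lines, building the full list of non-empty line indices and indexing it from the end, B makes a single backward character scan with a counter and breaks as soon as the start of the k-th non-empty line from the end is found.
import Mathlib
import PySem

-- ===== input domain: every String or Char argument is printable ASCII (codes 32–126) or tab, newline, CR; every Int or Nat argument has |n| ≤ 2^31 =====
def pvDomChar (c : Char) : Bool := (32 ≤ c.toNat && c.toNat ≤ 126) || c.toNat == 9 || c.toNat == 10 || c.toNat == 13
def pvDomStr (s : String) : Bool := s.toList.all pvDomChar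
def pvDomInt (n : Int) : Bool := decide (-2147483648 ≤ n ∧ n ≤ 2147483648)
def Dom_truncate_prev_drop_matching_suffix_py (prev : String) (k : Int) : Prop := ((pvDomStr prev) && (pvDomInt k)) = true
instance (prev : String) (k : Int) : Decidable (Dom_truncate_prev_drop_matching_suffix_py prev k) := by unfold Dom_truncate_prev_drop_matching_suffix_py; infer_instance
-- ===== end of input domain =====

-- B replaces A's split-into-lines + full index-list + negative indexing by a single backward
-- character scan with a counter and early exit.

-- ===== PORT A =====
-- str.splitlines(keepends=True), hand-ported; exact on the stated ASCII domain, whose only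
-- line boundaries are '\n', '\r', '\r\n' (Python's further boundary chars lie outside Dom_).
def splitKeepA : List Char → List (List Char)
  | [] => []
  | c :: rest =>
    if c = '\n' then ['\n'] :: splitKeepA rest
    else if c = '\r' then
      match rest with
      | '\n' :: rest' => ['\r', '\n'] :: splitKeepA rest'
      | r => ['\r'] :: splitKeepA r
    else
      match splitKeepA rest with
      | [] => [[c]]
      | l :: ls => (c :: l) :: ls
termination_by cs => cs.length
decreasing_by all_goals simp

def truncate_prev_drop_matching_suffix_py (prev : String) (k : Int) : String :=
  if k ≤ 0 then prev
  else
    let lines := splitKeepA prev.toList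
    let nonempty_idx := ((PySem.List.enumerate lines 0).filter
        (fun p => !(PySem.Chars.strip p.2).isEmpty)).map (·.1)
    if (nonempty_idx.length : Int) < k then prev
    else
      let first_drop := PySem.List.pyGetD nonempty_idx (-k) 0  -- in range: 1 ≤ k ≤ len
      String.ofList (PySem.Chars.rstrip (PySem.List.slice lines none (some first_drop)).flatten)

-- ===== PORT B =====
-- the backward for-loop of Source B: state (count, has); .inl cut = break with cut, .inr = loop ended
def bLoopAlt : List Char → Int → Int → Bool → Sum Nat (Int × Bool)
  | [], _, count, has => .inr (count, has)
  | c :: rest, k, count, has =>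
    if c = '\n' ∨ c = '\r' then
      if has then
        if count + 1 = k then .inl (rest.length + 1)  -- cut = len(prev) - tail
        else bLoopAlt rest k (count + 1) false
      else bLoopAlt rest k count has
    else if PySem.Chars.isspace c = false then bLoopAlt rest k count true
    else bLoopAlt rest k count has

def truncate_prev_drop_matching_suffix_py_alt (prev : String) (k : Int) : String :=
  if k ≤ 0 then prev
  else
    match bLoopAlt prev.toList.reverse k 0 false with
    | .inl cut => String.ofList (PySem.Chars.rstrip (prev.toList.take cut))  -- prev[:cut], cut ≥ 0
    | .inr (count, has) =>
      let count := if has then count + 1 else count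
      if count < k then prev
      else String.ofList (PySem.Chars.rstrip (prev.toList.take 0))

-- ===== PRECONDITION & SPEC =====
def Spec_truncate_prev_drop_matching_suffix_py (prev : String) (k : Int) (out : String) : Prop := out = truncate_prev_drop_matching_suffix_py_alt prev k
instance (prev : String) (k : Int) (out : String) : Decidable (Spec_truncate_prev_drop_matching_suffix_py prev k out) := by unfold Spec_truncate_prev_drop_matching_suffix_py; infer_instance

-- ===== CLAIM (what is proved, stated in full; the proofs are below) =====
def Claim_equal_truncate_prev_drop_matching_suffix_py : Prop := ∀ (prev : String) (k : Int), Dom_truncate_prev_drop_matching_suffix_py prev k → Spec_truncate_prev_drop_matching_suffix_py prev k (truncate_prev_drop_matching_suffix_py prev k)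

-- ===== LEMMAS AND PROOFS =====

-- non-space character / line-with-content test
def nsb (c : Char) : Bool := !PySem.Chars.isspace c
def hasNS (l : List Char) : Bool := l.any nsb
-- no line-terminator characters
def noTerm (cs : List Char) : Prop := ∀ c ∈ cs, c ≠ '\n' ∧ c ≠ '\r'
-- a terminated line as produced by splitlines(keepends=True)
def TLine (l : List Char) : Prop :=
  ∃ content, noTerm content ∧
    (l = content ++ ['\n'] ∨ l = content ++ ['\r'] ∨ l = content ++ ['\r', '\n'])
-- shape of a splitlines(keepends=True) result: all lines terminated except possibly the last
def LinesP : List (List Char) → Prop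
  | [] => True
  | [l] => TLine l ∨ noTerm l
  | l :: ls => TLine l ∧ LinesP ls

-- line-level image of bLoopAlt (recursion from the front; the scan runs right-to-left)
def gLines : List (List Char) → Int → Int → Bool → Sum Nat (Int × Bool)
  | [], _, c, h => .inr (c, h)
  | l :: X, k, c, h =>
    match gLines X k c h with
    | .inl cut => .inl (cut + l.length)
    | .inr s =>
      if s.2 then (if s.1 + 1 = k then .inl l.length else .inr (s.1 + 1, hasNS l))
      else .inr (s.1, hasNS l)

-- common reference: countdown over the per-line flags, from the end
def midGoB : List Bool → Int → Option Nat
  | [], _ => none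
  | b :: bs, r => if b then (if r = 1 then some bs.length else midGoB bs (r - 1)) else midGoB bs r

-- positions of `true` in a flag list (A's nonempty_idx, as Nats)
def idxs : List Bool → List Nat
  | [] => []
  | b :: t => (if b then [0] else []) ++ (idxs t).map (· + 1)

theorem splitKeepA_flatten (cs : List Char) : (splitKeepA cs).flatten = cs := by
  fun_induction splitKeepA cs <;> simp_all

theorem TLine_nl : TLine ['\n'] := ⟨[], by simp [noTerm], by simp⟩
theorem TLine_cr : TLine ['\r'] := ⟨[], by simp [noTerm], by simp⟩
theorem TLine_crnl : TLine ['\r', '\n'] := ⟨[], by simp [noTerm], by simp⟩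

theorem LinesP_cons_of_TLine {l : List Char} {ls : List (List Char)} (h1 : TLine l) (h2 : LinesP ls) :
    LinesP (l :: ls) := by
  cases ls with
  | nil => exact Or.inl h1
  | cons a t => exact ⟨h1, h2⟩

theorem TLine_cons {c : Char} {l : List Char} (hc1 : c ≠ '\n') (hc2 : c ≠ '\r') (h : TLine l) :
    TLine (c :: l) := by
  obtain ⟨content, hnt, hl⟩ := h
  refine ⟨c :: content, ?_, by rcases hl with h | h | h <;> subst h <;> simp⟩
  intro x hx
  simp at hx
  rcases hx with rfl | hx
  · exact ⟨hc1, hc2⟩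
  · exact hnt x hx

theorem splitKeepA_LinesP (cs : List Char) : LinesP (splitKeepA cs) := by
  fun_induction splitKeepA cs with
  | case1 => trivial
  | case2 rest ih => exact LinesP_cons_of_TLine TLine_nl ih
  | case3 rest' h ih => exact LinesP_cons_of_TLine TLine_crnl ih
  | case4 r hne h ih => exact LinesP_cons_of_TLine TLine_cr ih
  | case5 c rest h1 h2 heq ih => exact Or.inr (by intro x hx; simp at hx; subst hx; exact ⟨h1, h2⟩)
  | case6 c rest h1 h2 l ls heq ih =>
    rw [heq] at ih
    cases ls with
    | nil =>
      rcases ih with hT | hnt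
      · exact Or.inl (TLine_cons h1 h2 hT)
      · refine Or.inr ?_
        intro x hx
        simp at hx
        rcases hx with rfl | hx
        · exact ⟨h1, h2⟩
        · exact hnt x hx
    | cons a t => exact ⟨TLine_cons h1 h2 ih.1, ih.2⟩

theorem LinesP_decomp {L : List (List Char)} (h : LinesP L) :
    L = [] ∨ ∃ La l0, L = La ++ [l0] ∧ (∀ l ∈ La, TLine l) ∧ (TLine l0 ∨ noTerm l0) := by
  induction L with
  | nil => exact Or.inl rfl
  | cons l ls ih =>
    right
    cases ls with
    | nil => exact ⟨[], l, rfl, by simp, h⟩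
    | cons a t =>
      obtain ⟨hT, hrest⟩ := h
      rcases ih hrest with hnil | ⟨La, l0, heq, hLa, hl0⟩
      · simp at hnil
      · refine ⟨l :: La, l0, by simp [heq], ?_, hl0⟩
        intro x hx
        simp at hx
        rcases hx with rfl | hx
        · exact hT
        · exact hLa x hx

theorem bLoopAlt_append (xs ys : List Char) (k c : Int) (h : Bool) :
    bLoopAlt (xs ++ ys) k c h =
      match bLoopAlt xs k c h with
      | .inl cut => .inl (cut + ys.length)
      | .inr s => bLoopAlt ys k s.1 s.2 := by
  induction xs generalizing c h with
  | nil => simp [bLoopAlt]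
  | cons a t ih =>
    simp only [List.cons_append, bLoopAlt]
    split_ifs <;> simp [ih, List.length_append] <;> omega

theorem bLoopAlt_noTerm (cs : List Char) (hnt : noTerm cs) (rest : List Char) (k c : Int) (h : Bool) :
    bLoopAlt (cs ++ rest) k c h = bLoopAlt rest k c (h || cs.any nsb) := by
  induction cs generalizing h with
  | nil => simp
  | cons a t ih =>
    have ha := hnt a (by simp)
    have hnt' : noTerm t := fun c hc => hnt c (by simp [hc])
    simp only [List.cons_append, bLoopAlt, ha.1, ha.2, or_self, if_false]
    by_cases hs : PySem.Chars.isspace a = false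
    · simp [hs, ih hnt', nsb]
    · simp only [Bool.not_eq_false] at hs
      simp [ih hnt', nsb, hs]

theorem nsb_nl : nsb '\n' = false := by decide
theorem nsb_cr : nsb '\r' = false := by decide

theorem hasNS_term {content l : List Char}
    (hl : l = content ++ ['\n'] ∨ l = content ++ ['\r'] ∨ l = content ++ ['\r', '\n']) :
    hasNS l = content.any nsb := by
  rcases hl with h | h | h <;> subst h <;>
    simp [hasNS, List.any_append, nsb_nl, nsb_cr]

theorem noTerm_reverse {cs : List Char} (h : noTerm cs) : noTerm cs.reverse := by
  intro c hc
  exact h c (by simpa using hc)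

theorem bLoopAlt_TLine (l : List Char) (hl : TLine l) (rest : List Char) (k c : Int) (h : Bool) :
    bLoopAlt (l.reverse ++ rest) k c h =
      if h then
        (if c + 1 = k then .inl (rest.length + l.length)
         else bLoopAlt rest k (c + 1) (hasNS l))
      else bLoopAlt rest k c (hasNS l) := by
  obtain ⟨content, hnt, hcase⟩ := hl
  have hrev := noTerm_reverse hnt
  have hNS : hasNS l = content.any nsb := hasNS_term hcase
  have hany : content.reverse.any nsb = content.any nsb := List.any_reverse
  rcases hcase with hc | hc | hc <;> subst hc
  · simp only [List.reverse_append, List.reverse_singleton, List.singleton_append,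
      List.cons_append, bLoopAlt, List.length_append]
    by_cases hh : h
    · by_cases hk : c + 1 = k
      · simp [hh, hk, List.length_append]
        omega
      · simp [hh, hk, bLoopAlt_noTerm _ hrev, hany, hNS]
    · simp [hh, bLoopAlt_noTerm _ hrev, hany, hNS]
  · simp only [List.reverse_append, List.reverse_singleton, List.singleton_append,
      List.cons_append, bLoopAlt, List.length_append]
    by_cases hh : h
    · by_cases hk : c + 1 = k
      · simp [hh, hk, List.length_append]
        omega
      · simp [hh, hk, bLoopAlt_noTerm _ hrev, hany, hNS]
    · simp [hh, bLoopAlt_noTerm _ hrev, hany, hNS]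
  · have hsh : (content ++ ['\r', '\n']).reverse ++ rest
        = '\n' :: '\r' :: (content.reverse ++ rest) := by simp
    rw [hsh]
    simp only [bLoopAlt]
    by_cases hh : h
    · by_cases hk : c + 1 = k
      · simp [hh, hk, List.length_append]
        omega
      · simp [hh, hk, bLoopAlt, bLoopAlt_noTerm _ hrev, hany, hNS]
    · simp [hh, bLoopAlt, bLoopAlt_noTerm _ hrev, hany, hNS]

theorem gLines_eq_bLoopAlt (La : List (List Char)) (hT : ∀ l ∈ La, TLine l) (k c : Int) (h : Bool) :
    bLoopAlt (La.flatten).reverse k c h = gLines La k c h := by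
  induction La generalizing c h with
  | nil => simp [bLoopAlt, gLines]
  | cons l X ih =>
    have hTX : ∀ l' ∈ X, TLine l' := fun l' hl' => hT l' (by simp [hl'])
    have hsplit : (List.flatten (l :: X)).reverse = (X.flatten).reverse ++ l.reverse := by
      simp [List.flatten_cons, List.reverse_append]
    rw [hsplit, bLoopAlt_append, ih hTX]
    have hstep := bLoopAlt_TLine l (hT l (by simp)) [] k
    simp only [List.append_nil, List.length_nil] at hstep
    rcases hg : gLines X k c h with cut | s
    · simp [gLines, hg]
    · simp only [gLines, hg]
      rw [hstep s.1 s.2]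
      by_cases hh : s.2
      · simp only [hh, if_true]
        split_ifs with hk
        · simp
        · simp [bLoopAlt]
      · simp [hh, bLoopAlt]

theorem midGoB_lt {bs : List Bool} {r : Int} {j : Nat} (h : midGoB bs r = some j) : j < bs.length := by
  induction bs generalizing r with
  | nil => simp [midGoB] at h
  | cons b t ih =>
    simp only [midGoB] at h
    split_ifs at h
    · simp only [Option.some.injEq] at h; simp only [List.length_cons]; omega
    · exact Nat.lt_succ_of_lt (ih h)
    · exact Nat.lt_succ_of_lt (ih h)

theorem gLines_append (X Y : List (List Char)) (k c : Int) (h : Bool) :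
    gLines (X ++ Y) k c h =
      match gLines Y k c h with
      | .inl cut => .inl (cut + (X.flatten).length)
      | .inr s => gLines X k s.1 s.2 := by
  induction X generalizing c h with
  | nil =>
    rcases hg : gLines Y k c h with cut | s
    · simp [hg]
    · simp [hg, gLines]
  | cons x X' ih =>
    simp only [List.cons_append, gLines, ih]
    rcases hg : gLines Y k c h with cut | s
    · simp [List.length_append]
      omega
    · rfl

-- B's scan over the terminated lines La (with incoming flag h from the dangling last line)
-- equals the countdown reference midGoB, mapped to character positions.
theorem midGoB_true_ne (bs : List Bool) (r : Int) (hr : r ≠ 1) :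
    midGoB (true :: bs) r = midGoB bs (r - 1) := by simp [midGoB, hr]
theorem midGoB_true_one (bs : List Bool) : midGoB (true :: bs) 1 = some bs.length := by
  simp [midGoB]
theorem midGoB_false (bs : List Bool) (r : Int) : midGoB (false :: bs) r = midGoB bs r := by
  simp [midGoB]

theorem gLines_eq_midGoB (k : Int) (La : List (List Char)) (c : Int) (h : Bool)
    (hc0 : 0 ≤ c) (hck : c < k) :
    (match gLines La k c h with
     | .inl cut => some cut
     | .inr s => if (if s.2 then s.1 + 1 else s.1) < k then none else some 0)
    = Option.map (fun j => ((La.take j).flatten).length)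
        (midGoB (h :: (La.map hasNS).reverse) (k - c)) := by
  induction La using List.reverseRecOn generalizing c h with
  | nil =>
    simp only [gLines, midGoB, List.map_nil, List.reverse_nil, List.length_nil]
    by_cases hh : h
    · by_cases hk : k - c = 1
      · have hlt : ¬ (c + 1 < k) := by omega
        simp [hh, hk, hlt]
      · have hlt : c + 1 < k := by omega
        simp [hh, hk, hlt, midGoB]
    · simp [hh, hck, midGoB]
  | append_singleton X l ih =>
    have hrev : ((X ++ [l]).map hasNS).reverse = hasNS l :: (X.map hasNS).reverse := by
      simp
    rw [hrev, gLines_append]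
    have hsingle : gLines [l] k c h
        = if h then (if c + 1 = k then .inl l.length else .inr (c + 1, hasNS l))
          else .inr (c, hasNS l) := by
      simp [gLines]
    rw [hsingle]
    cases h with
    | true =>
      by_cases hk : c + 1 = k
      · have hr1 : k - c = 1 := by omega
        simp only [if_true, hk, midGoB, hr1]
        simp [List.take_of_length_le, List.flatten_append]
        omega
      · have hr1 : k - c ≠ 1 := by omega
        have hdec : k - c - 1 = k - (c + 1) := by omega
        simp only [if_true, hk, if_false]
        rw [midGoB_true_ne _ _ hr1, hdec, ih (c + 1) (hasNS l) (by omega) (by omega)]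
        rcases hm : midGoB (hasNS l :: (X.map hasNS).reverse) (k - (c + 1)) with _ | j
        · rfl
        · have hj : j ≤ X.length := by
            have := midGoB_lt hm
            simp at this
            omega
          simp [List.take_append_of_le_length hj]
          rw [List.take_append_of_le_length (by simpa using hj)]
    | false =>
      simp only [Bool.false_eq_true, if_false]
      rw [midGoB_false, ih c (hasNS l) hc0 hck]
      rcases hm : midGoB (hasNS l :: (X.map hasNS).reverse) (k - c) with _ | j
      · rfl
      · have hj : j ≤ X.length := by
          have := midGoB_lt hm
          simp at this
          omega
        simp [List.take_append_of_le_length hj]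
        rw [List.take_append_of_le_length (by simpa using hj)]

theorem idxs_append_singleton (X : List Bool) (b : Bool) :
    idxs (X ++ [b]) = idxs X ++ (if b then [X.length] else []) := by
  induction X with
  | nil => cases b <;> simp [idxs]
  | cons a t ih => cases a <;> cases b <;> simp [idxs, ih, List.map_append]

theorem midGoB_reverse (bs : List Bool) (r : Int) (hr : 1 ≤ r) :
    midGoB bs.reverse r =
      if ((idxs bs).length : Int) < r then none
      else some ((idxs bs).getD ((idxs bs).length - r.toNat) 0) := by
  induction bs using List.reverseRecOn generalizing r with
  | nil => simp [midGoB, idxs]; omega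
  | append_singleton X b ih =>
    rw [List.reverse_append, List.reverse_singleton, List.singleton_append,
      idxs_append_singleton]
    cases b with
    | true =>
      simp only [reduceIte]
      by_cases hr1 : r = 1
      · subst hr1
        have hlen : ¬ (((idxs X ++ [X.length]).length : Int) < 1) := by
          simp only [List.length_append, List.length_cons, List.length_nil]
          omega
        rw [midGoB_true_one, if_neg hlen]
        have hidx : (idxs X ++ [X.length]).length - (1:Int).toNat = (idxs X).length := by
          simp
        rw [hidx]
        rw [List.getD_eq_getElem?_getD, List.getElem?_append_right (by simp)]
        simp
      · have h2 : 1 ≤ r - 1 := by omega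
        rw [midGoB_true_ne _ _ hr1, ih (r - 1) h2]
        have hlen : ((idxs X ++ [X.length]).length : Int) = (idxs X).length + 1 := by simp
        by_cases hlt : ((idxs X).length : Int) < r - 1
        · rw [if_pos hlt, if_pos (by rw [hlen]; omega)]
        · rw [if_neg hlt, if_neg (by rw [hlen]; omega)]
          have hi : (idxs X ++ [X.length]).length - r.toNat = (idxs X).length - (r-1).toNat := by
            simp only [List.length_append, List.length_cons, List.length_nil]
            omega
          rw [hi]
          have hlt2 : (idxs X).length - (r-1).toNat < (idxs X).length := by omega
          rw [List.getD_eq_getElem?_getD, List.getD_eq_getElem?_getD,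
            List.getElem?_append_left hlt2]
    | false =>
      rw [midGoB_false, ih r hr]
      simp

theorem dropWhile_forall {α : Type} (p : α → Bool) (l : List α) :
    (∀ x ∈ l.dropWhile p, p x = true) ↔ ∀ x ∈ l, p x = true := by
  induction l with
  | nil => simp
  | cons a t ih =>
    by_cases hp : p a = true
    · simp [List.dropWhile_cons, hp, ih]
    · simp [List.dropWhile_cons, hp]

theorem strip_eq_nil_iff (l : List Char) :
    PySem.Chars.strip l = [] ↔ ∀ c ∈ l, PySem.Chars.isspace c = true := by
  rw [PySem.Chars.strip, PySem.Chars.rstrip, PySem.Chars.lstrip]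
  rw [List.reverse_eq_nil_iff, List.dropWhile_eq_nil_iff]
  constructor
  · intro h c hc
    have := (dropWhile_forall PySem.Chars.isspace l).mp (by
      intro x hx
      exact h x (by simpa using hx))
    exact this c hc
  · intro h c hc
    have hc' : c ∈ List.dropWhile PySem.Chars.isspace l := by simpa using hc
    exact h c ((List.dropWhile_sublist _).mem hc')

theorem strip_isEmpty (l : List Char) :
    (PySem.Chars.strip l).isEmpty = !(hasNS l) := by
  cases hA : hasNS l
  · simp only [hasNS, List.any_eq_false, nsb, Bool.not_eq_true] at hA
    have : ∀ c ∈ l, PySem.Chars.isspace c = true := by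
      intro c hc
      have := hA c hc
      simpa using this
    have hnil : PySem.Chars.strip l = [] := (strip_eq_nil_iff l).mpr this
    simp [hnil]
  · simp only [hasNS, List.any_eq_true] at hA
    obtain ⟨c, hc, hcs⟩ := hA
    have hns : ¬ (PySem.Chars.strip l = []) := by
      rw [strip_eq_nil_iff]
      intro h
      have := h c hc
      simp [nsb, this] at hcs
    simp [List.isEmpty_iff, hns]

theorem enumerate_filter_idxs (L : List (List Char)) (s : Int) :
    (((PySem.List.enumerate L s).filter (fun p => !(PySem.Chars.strip p.2).isEmpty)).map (·.1))
      = (idxs (L.map hasNS)).map (fun i : Nat => s + (i : Int)) := by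
  induction L generalizing s with
  | nil => simp [PySem.List.enumerate, idxs]
  | cons l t ih =>
    rw [PySem.List.enumerate_cons]
    have hmm : ∀ (xs : List Nat),
        (xs.map (fun i : Nat => i + 1)).map (fun i : Nat => s + (i : Int))
          = xs.map (fun i : Nat => (s + 1) + (i : Int)) := by
      intro xs
      rw [List.map_map]
      apply List.map_congr_left
      intro a _
      simp only [Function.comp]
      push_cast
      ring
    cases hl : hasNS l
    · have : (!(PySem.Chars.strip l).isEmpty) = false := by
        rw [strip_isEmpty, hl]
        rfl
      simp only [List.filter_cons, this, Bool.false_eq_true, reduceIte, List.map_cons, idxs, hl,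
        List.nil_append]
      rw [ih (s + 1), hmm]
    · have : (!(PySem.Chars.strip l).isEmpty) = true := by
        rw [strip_isEmpty, hl]
        rfl
      simp only [List.filter_cons, this, reduceIte, List.map_cons, idxs, hl, List.singleton_append]
      rw [ih (s + 1), hmm]
      simp

-- the full pipeline, assembled
theorem main_eq (prev : String) (k : Int) :
    truncate_prev_drop_matching_suffix_py prev k
      = truncate_prev_drop_matching_suffix_py_alt prev k := by
  by_cases hk : k ≤ 0
  · simp [truncate_prev_drop_matching_suffix_py, truncate_prev_drop_matching_suffix_py_alt, hk]
  · have hk1 : 1 ≤ k := by omega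
    simp only [truncate_prev_drop_matching_suffix_py, truncate_prev_drop_matching_suffix_py_alt,
      hk, if_false]
    set s : List Char := prev.toList with hsdef
    set L : List (List Char) := splitKeepA s with hLdef
    set bs : List Bool := L.map hasNS with hbsdef
    have hflat : L.flatten = s := splitKeepA_flatten s
    have hNI : ((PySem.List.enumerate L 0).filter (fun p => !(PySem.Chars.strip p.2).isEmpty)).map (·.1)
        = (idxs bs).map (fun i : Nat => (i : Int)) := by
      rw [enumerate_filter_idxs L 0]
      apply List.map_congr_left
      intro a _
      omega
    rw [hNI]
    rcases LinesP_decomp (splitKeepA_LinesP s) with hnil | ⟨La, l0, hdec, hTa, hl0⟩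
    · -- empty string: both sides return prev
      rw [← hLdef] at hnil
      have hs : s = [] := by rw [← hflat, hnil]; rfl
      have hbs : bs = [] := by rw [hbsdef, hnil]; rfl
      rw [hbs, hs]
      have h0k : (0 : Int) < k := by omega
      simp [idxs, bLoopAlt, h0k]
    · rw [← hLdef] at hdec
      have hsrev : s.reverse = l0.reverse ++ (La.flatten).reverse := by
        rw [← hflat, hdec]
        simp
      have hgl : bLoopAlt s.reverse k 0 false = gLines La k 0 (hasNS l0) := by
        rw [hsrev]
        rcases hl0 with hT | hnt
        · rw [bLoopAlt_TLine l0 hT]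
          simp only [Bool.false_eq_true, if_false]
          exact gLines_eq_bLoopAlt La hTa k 0 (hasNS l0)
        · rw [bLoopAlt_noTerm l0.reverse (noTerm_reverse hnt)]
          simp only [Bool.false_or, List.any_reverse]
          exact gLines_eq_bLoopAlt La hTa k 0 (hasNS l0)
      have hcomb := gLines_eq_midGoB k La 0 (hasNS l0) le_rfl (by omega)
      have hlist : hasNS l0 :: (La.map hasNS).reverse = bs.reverse := by
        rw [hbsdef, hdec]
        simp
      rw [hlist, sub_zero] at hcomb
      have hmid := midGoB_reverse bs k (by omega)
      set m : Nat := (idxs bs).length with hmdef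
      have hlenL : bs.length = L.length := by rw [hbsdef]; simp
      by_cases hm : (m : Int) < k
      · -- fewer than k non-empty lines: both sides return prev
        rw [if_pos hm] at hmid
        rw [hmid] at hcomb
        simp only [Option.map_none] at hcomb
        have hA : ((((idxs bs).map (fun i : Nat => (i : Int))).length : Int) < k) := by
          simpa using hm
        rw [if_pos hA]
        rw [hgl]
        rcases hg : gLines La k 0 (hasNS l0) with cut | st
        · rw [hg] at hcomb
          simp at hcomb
        · rcases st with ⟨c0, h0⟩
          rw [hg] at hcomb
          dsimp only at hcomb ⊢
          have hlt : (if h0 then c0 + 1 else c0) < k := by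
            by_contra hcon
            rw [if_neg hcon] at hcomb
            simp at hcomb
          rw [if_pos hlt]
      · -- drop from the start of the k-th non-empty line from the end
        rw [if_neg hm] at hmid
        rw [hmid] at hcomb
        simp only [Option.map_some] at hcomb
        set j : Nat := (idxs bs).getD (m - k.toNat) 0 with hjdef
        have hjlt : j < L.length := by
          have := midGoB_lt hmid
          simpa [hlenL] using this
        have hjLa : j ≤ La.length := by
          rw [hdec] at hjlt
          simp at hjlt
          omega
        have htakeLa : La.take j = L.take j := by
          rw [hdec, List.take_append_of_le_length hjLa]
        have hAcond : ¬ ((((idxs bs).map (fun i : Nat => (i : Int))).length : Int) < k) := by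
          simpa using hm
        rw [if_neg hAcond]
        -- A's negative index resolves to j
        have hmk : k.toNat ≤ m := by omega
        have hm1 : m - k.toNat < m := by omega
        have hfd : PySem.List.pyGetD ((idxs bs).map (fun i : Nat => (i : Int))) (-k) 0 = (j : Int) := by
          have hkN : -k = -((k.toNat : Nat) : Int) := by omega
          rw [hkN, PySem.List.pyGetD_neg_natCast _ k.toNat 0 (by omega) (by simp only [List.length_map]; omega)]
          have hlen2 : ((idxs bs).map (fun i : Nat => (i : Int))).length = m := by
            simp only [List.length_map]
            omega
          simp only [hlen2, List.getElem_map]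
          rw [hjdef, List.getD_eq_getElem?_getD, List.getElem?_eq_getElem hm1]
          simp
        rw [hfd, PySem.List.slice_to_natCast L j]
        -- B side
        rw [hgl]
        have hpref : s.take ((L.take j).flatten.length) = (L.take j).flatten := by
          have h1 : (L.take j).flatten ++ (L.drop j).flatten = s := by
            rw [← List.flatten_append, List.take_append_drop, hflat]
          rw [← h1, List.take_left]
        rcases hg : gLines La k 0 (hasNS l0) with cut | st
        · rw [hg] at hcomb
          dsimp only at hcomb ⊢
          simp only [Option.some.injEq] at hcomb
          rw [htakeLa] at hcomb
          rw [hcomb, hpref]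
        · rcases st with ⟨c0, h0⟩
          rw [hg] at hcomb
          dsimp only at hcomb ⊢
          have hge : ¬ ((if h0 then c0 + 1 else c0) < k) := by
            by_contra hcon
            rw [if_pos hcon] at hcomb
            simp at hcomb
          rw [if_neg hge] at hcomb
          simp only [Option.some.injEq] at hcomb
          have hzero : (L.take j).flatten = [] := by
            rw [← htakeLa]
            exact List.eq_nil_of_length_eq_zero hcomb.symm
          rw [if_neg hge, hzero]
          simp

-- ===== VERDICT (by name: the statement is the Claim_ definition above) =====
theorem truncate_prev_drop_matching_suffix_py_spec : Claim_equal_truncate_prev_drop_matching_suffix_py := by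
  unfold Claim_equal_truncate_prev_drop_matching_suffix_py
  intro prev k _
  unfold Spec_truncate_prev_drop_matching_suffix_py
  exact main_eq prev k
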